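-- pv_equiv track=rewrite | github.com/davronkhamdamov/learning_algo | two_pointers/solutions.py | two_sum_ii_best
-- ===== SOURCE A (Python) =====
-- from typing import List
--
-- def two_sum_ii_best(numbers: List[int], target: int) -> List[int]:
--     left, right = 0, len(numbers) - 1
--
--     while left < right:
--         total = numbers[left] + numbers[right]
--         if total == target:
--             return [left + 1, right + 1]
--         if total < target:
--             left += 1
--         else:
--             right -= 1
--
--     return []
-- ===== SOURCE B (Python) =====
-- def two_sum_ii_best(numbers, target):
--     n = len(numbers)
--     for i in range(n):
--         c = target - numbers[i]
--         # hand-rolled bisect_right for c over the whole (sorted) list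
--         lo, hi = 0, n
--         while lo < hi:
--             mid = (lo + hi) // 2
--             if numbers[mid] <= c:
--                 lo = mid + 1
--             else:
--                 hi = mid
--         j = lo - 1  # last index with numbers[j] == c, if any
--         if j > i and numbers[j] == c:
--             return [i + 1, j + 1]
--     return []
-- ===== Notes on version B (the rewrite author's own statement) =====
-- stated objective: alternative
-- what changed: Replaces the converging two-pointer scan with an outer left-to-right scan that binary-searches (hand-rolled bisect_right) for the last occurrence of the complement of each element.
-- outside the precondition, e.g. on two_sum_ii_best([2, 1, 3], 4): A returns [], B returns [2, 3]
import Mathlib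
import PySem

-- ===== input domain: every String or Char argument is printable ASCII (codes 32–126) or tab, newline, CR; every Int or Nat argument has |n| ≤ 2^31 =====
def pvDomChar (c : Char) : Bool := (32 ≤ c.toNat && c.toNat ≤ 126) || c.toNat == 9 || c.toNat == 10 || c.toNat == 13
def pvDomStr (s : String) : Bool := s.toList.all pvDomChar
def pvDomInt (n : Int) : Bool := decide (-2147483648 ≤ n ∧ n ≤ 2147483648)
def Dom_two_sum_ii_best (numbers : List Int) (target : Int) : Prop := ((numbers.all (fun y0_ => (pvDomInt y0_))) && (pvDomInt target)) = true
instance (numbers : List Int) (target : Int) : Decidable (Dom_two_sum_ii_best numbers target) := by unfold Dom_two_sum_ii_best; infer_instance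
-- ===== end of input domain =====

-- B replaces the converging two-pointer scan by, for each left index, a hand-rolled
-- bisect_right binary search for the complement (last occurrence); an alternative
-- algorithm of different shape, equal on the sorted inputs Two Sum II is about.


-- ===== PORT A =====
-- the while loop; along every reachable state 0 ≤ left < right ≤ len-1, so the
-- pyGetD lookups (default 0) are exact (Python never raises here)
def two_sum_ii_best_loop (numbers : List Int) (target : Int) (left right : Int) : List Int :=
  if h : left < right then
    let total := PySem.List.pyGetD numbers left 0 + PySem.List.pyGetD numbers right 0
    if total = target then [left + 1, right + 1]
    else if total < target then two_sum_ii_best_loop numbers target (left + 1) right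
    else two_sum_ii_best_loop numbers target left (right - 1)
  else []
termination_by (right - left).toNat
decreasing_by all_goals omega

def two_sum_ii_best (numbers : List Int) (target : Int) : List Int :=
  two_sum_ii_best_loop numbers target 0 ((numbers.length : Int) - 1)

-- ===== PORT B =====
-- the hand-rolled bisect_right loop of Source B (lo, hi, mid all stay in 0..len, so
-- Nat and Nat division are exact for Python's nonnegative ints and `//`)
def alt_bisect (numbers : List Int) (c : Int) (lo hi : Nat) : Nat :=
  if h : lo < hi then
    let mid := (lo + hi) / 2
    if numbers.getD mid 0 ≤ c then alt_bisect numbers c (mid + 1) hi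
    else alt_bisect numbers c lo mid
  else lo
termination_by hi - lo
decreasing_by all_goals omega

-- the `for i in range(n)` scan; Python's `j = lo - 1; j > i and numbers[j] == c`
-- is `i < lo - 1 ∧ …` (for lo = 0 Python has j = -1 > i false; Nat's lo - 1 = 0 > i is false too,
-- and numbers[j] is only read when j > i ≥ 0, in range)
def alt_scan (numbers : List Int) (target : Int) (i : Nat) : List Int :=
  if h : i < numbers.length then
    let c := target - numbers.getD i 0
    let lo := alt_bisect numbers c 0 numbers.length
    if i < lo - 1 ∧ numbers.getD (lo - 1) 0 = c then
      [(i : Int) + 1, ((lo - 1 : Nat) : Int) + 1]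
    else alt_scan numbers target (i + 1)
  else []
termination_by numbers.length - i
decreasing_by all_goals omega

def two_sum_ii_best_alt (numbers : List Int) (target : Int) : List Int :=
  alt_scan numbers target 0

-- ===== PRECONDITION & SPEC =====
-- Pre_ excludes unsorted lists: Two Sum II's contract is a nondecreasing array; on
-- unsorted input both programs still return, but their values legitimately diverge
-- (a binary search is meaningless there), so nothing is claimed outside the contract.
def Pre_two_sum_ii_best (numbers : List Int) (target : Int) : Prop :=
  List.Pairwise (· ≤ ·) numbers
instance (numbers : List Int) (target : Int) : Decidable (Pre_two_sum_ii_best numbers target) := by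
  unfold Pre_two_sum_ii_best; infer_instance

def pvWitness_two_sum_ii_best : List Int × Int := ([1, 2, 3, 4], 6)

def Spec_two_sum_ii_best (numbers : List Int) (target : Int) (out : List Int) : Prop := out = two_sum_ii_best_alt numbers target
instance (numbers : List Int) (target : Int) (out : List Int) : Decidable (Spec_two_sum_ii_best numbers target out) := by unfold Spec_two_sum_ii_best; infer_instance

-- ===== CLAIM (what is proved, stated in full; the proofs are below) =====
def Claim_equal_two_sum_ii_best : Prop := ∀ (numbers : List Int) (target : Int), Dom_two_sum_ii_best numbers target → Pre_two_sum_ii_best numbers target → Spec_two_sum_ii_best numbers target (two_sum_ii_best numbers target)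

-- ===== LEMMAS AND PROOFS =====

-- `∃ a solution with left index i` (indices as Nats, values via getD, in-range by the bounds)
def QQ (xs : List Int) (t : Int) (i : Nat) : Prop :=
  ∃ j, j < xs.length ∧ i < j ∧ xs.getD i 0 + xs.getD j 0 = t

-- last index holding value c (0 if none)
def jst (xs : List Int) (c : Int) : Nat :=
  Nat.findGreatest (fun j => j < xs.length ∧ xs.getD j 0 = c) xs.length

lemma sorted_getD {xs : List Int} (hs : List.Pairwise (· ≤ ·) xs) {i j : Nat}
    (hij : i ≤ j) (hj : j < xs.length) : xs.getD i 0 ≤ xs.getD j 0 := by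
  rcases Nat.eq_or_lt_of_le hij with rfl | h
  · exact le_refl _
  · have := List.pairwise_iff_getElem.mp hs i j (lt_trans h hj) hj h
    rwa [List.getD_eq_getElem xs 0 (lt_trans h hj), List.getD_eq_getElem xs 0 hj]

lemma bisect_spec {xs : List Int} (hs : List.Pairwise (· ≤ ·) xs) (c : Int) :
    ∀ (fuel lo hi : Nat), hi - lo ≤ fuel → lo ≤ hi → hi ≤ xs.length →
    (∀ k, k < lo → xs.getD k 0 ≤ c) → (∀ k, hi ≤ k → k < xs.length → c < xs.getD k 0) →
    lo ≤ alt_bisect xs c lo hi ∧ alt_bisect xs c lo hi ≤ hi ∧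
    (∀ k, k < alt_bisect xs c lo hi → xs.getD k 0 ≤ c) ∧
    (∀ k, alt_bisect xs c lo hi ≤ k → k < xs.length → c < xs.getD k 0) := by
  intro fuel
  induction fuel with
  | zero =>
    intro lo hi hfuel hlh hhn hlow hhigh
    rw [alt_bisect]
    have : ¬ lo < hi := by omega
    simp only [this, dif_neg, not_false_iff]
    exact ⟨le_refl _, hlh, hlow, fun k hk => hhigh k (by omega)⟩
  | succ m ih =>
    intro lo hi hfuel hlh hhn hlow hhigh
    rw [alt_bisect]
    by_cases h : lo < hi
    · simp only [h, dif_pos]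
      have hmid1 : lo ≤ (lo + hi) / 2 := by omega
      have hmid2 : (lo + hi) / 2 < hi := by omega
      by_cases hc : xs.getD ((lo + hi) / 2) 0 ≤ c
      · simp only [hc, if_pos]
        have hres := ih ((lo + hi) / 2 + 1) hi (by omega) (by omega) hhn
          (fun k hk => le_trans (sorted_getD hs (by omega) (by omega)) hc) hhigh
        exact ⟨by have := hres.1; omega, hres.2.1, hres.2.2.1, hres.2.2.2⟩
      · simp only [hc, if_neg, not_false_iff]
        have hpush : ∀ k, (lo + hi) / 2 ≤ k → k < xs.length → c < xs.getD k 0 := by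
          intro k hk hkn
          exact lt_of_lt_of_le (by omega) (sorted_getD hs hk hkn)
        have := ih lo ((lo + hi) / 2) (by omega) (by omega) (by omega) hlow hpush
        exact ⟨this.1, by omega, this.2.2.1, this.2.2.2⟩
    · simp only [h, dif_neg, not_false_iff]
      exact ⟨le_refl _, hlh, hlow, fun k hk => hhigh k (by omega)⟩

-- the scan's branch condition fires exactly when a solution with left index i exists,
-- and then `lo - 1` is the last occurrence of the complement
lemma cond_iff {xs : List Int} (hs : List.Pairwise (· ≤ ·) xs) (t : Int) (i : Nat)
    (_hi : i < xs.length) :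
    ((i < alt_bisect xs (t - xs.getD i 0) 0 xs.length - 1 ∧
      xs.getD (alt_bisect xs (t - xs.getD i 0) 0 xs.length - 1) 0 = t - xs.getD i 0)
        ↔ QQ xs t i) ∧
    (QQ xs t i →
      alt_bisect xs (t - xs.getD i 0) 0 xs.length - 1 = jst xs (t - xs.getD i 0)) := by
  set c := t - xs.getD i 0 with hc
  obtain ⟨h0, hn, hle, hgt⟩ :=
    bisect_spec hs c xs.length 0 xs.length (by omega) (by omega) (le_refl _)
      (by omega) (by omega)
  set r := alt_bisect xs c 0 xs.length with hr
  have hiff : (i < r - 1 ∧ xs.getD (r - 1) 0 = c) ↔ QQ xs t i := by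
    constructor
    · rintro ⟨h1, h2⟩
      exact ⟨r - 1, by omega, h1, by omega⟩
    · rintro ⟨j, hj, hij, hsum⟩
      have hjc : xs.getD j 0 = c := by omega
      have hjr : j < r := by
        by_contra hcon
        exact absurd hjc (ne_of_gt (hgt j (by omega) hj))
      have h1 : i < r - 1 := by omega
      have hcle : xs.getD (r - 1) 0 ≤ c := hle (r - 1) (by omega)
      have hcge : c ≤ xs.getD (r - 1) 0 := hjc ▸ sorted_getD hs (by omega) (by omega)
      exact ⟨h1, le_antisymm hcle hcge⟩
  refine ⟨hiff, fun hQ => ?_⟩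
  obtain ⟨h1, h2⟩ := hiff.mpr hQ
  rw [jst, eq_comm, Nat.findGreatest_eq_iff]
  refine ⟨by omega, fun _ => ⟨by omega, h2⟩, ?_⟩
  intro k hk hkn hP
  exact absurd hP.2 (ne_of_gt (hgt k (by omega) hP.1))

lemma scan_none {xs : List Int} (t : Int) (hnone : ∀ i, ¬ QQ xs t i)
    (hs : List.Pairwise (· ≤ ·) xs) :
    ∀ (fuel i : Nat), xs.length - i ≤ fuel → alt_scan xs t i = [] := by
  intro fuel
  induction fuel with
  | zero =>
    intro i hf
    rw [alt_scan]
    have : ¬ i < xs.length := by omega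
    simp [this]
  | succ m ih =>
    intro i hf
    rw [alt_scan]
    by_cases h : i < xs.length
    · simp only [h, dif_pos]
      have hcond := (cond_iff hs t i h).1
      rw [if_neg (fun hx => hnone i (hcond.mp hx))]
      exact ih (i + 1) (by omega)
    · simp [h]

lemma scan_found {xs : List Int} (t : Int) (hs : List.Pairwise (· ≤ ·) xs) (i0 : Nat)
    (hQ0 : QQ xs t i0) (hmin : ∀ i', i' < i0 → ¬ QQ xs t i') :
    ∀ (fuel i : Nat), i0 - i ≤ fuel → i ≤ i0 →
      alt_scan xs t i = [(i0 : Int) + 1, (jst xs (t - xs.getD i0 0) : Int) + 1] := by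
  have hi0n : i0 < xs.length := by
    obtain ⟨j, hj, hij, _⟩ := hQ0; omega
  intro fuel
  induction fuel with
  | zero =>
    intro i hf hle
    have : i = i0 := by omega
    subst this
    rw [alt_scan]
    simp only [hi0n, dif_pos]
    obtain ⟨hcond, hjst⟩ := cond_iff hs t i hi0n
    rw [if_pos (hcond.mpr hQ0), hjst hQ0]
  | succ m ih =>
    intro i hf hle
    rcases Nat.eq_or_lt_of_le hle with rfl | hlt
    · rw [alt_scan]
      simp only [hi0n, dif_pos]
      obtain ⟨hcond, hjst⟩ := cond_iff hs t i hi0n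
      rw [if_pos (hcond.mpr hQ0), hjst hQ0]
    · rw [alt_scan]
      have hin : i < xs.length := by omega
      simp only [hin, dif_pos]
      have hcond := (cond_iff hs t i hin).1
      rw [if_neg (fun hx => hmin i hlt (hcond.mp hx))]
      exact ih (i + 1) (by omega) (by omega)

lemma loopA_none {xs : List Int} (t : Int)
    (hnone : ∀ i, ¬ QQ xs t i) :
    ∀ (fuel : Nat) (l r : Int), 0 ≤ l → r ≤ (xs.length : Int) - 1 →
      (r - l).toNat ≤ fuel → two_sum_ii_best_loop xs t l r = [] := by
  intro fuel
  induction fuel with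
  | zero =>
    intro l r h0 hr hf
    rw [two_sum_ii_best_loop]
    have : ¬ l < r := by omega
    simp [this]
  | succ m ih =>
    intro l r h0 hr hf
    rw [two_sum_ii_best_loop]
    by_cases h : l < r
    · simp only [h, dif_pos]
      have hgl : PySem.List.pyGetD xs l 0 = xs.getD l.toNat 0 :=
        PySem.List.pyGetD_of_nonneg xs 0 h0
      have hgr : PySem.List.pyGetD xs r 0 = xs.getD r.toNat 0 :=
        PySem.List.pyGetD_of_nonneg xs 0 (by omega)
      by_cases heq : PySem.List.pyGetD xs l 0 + PySem.List.pyGetD xs r 0 = t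
      · exact absurd (show QQ xs t l.toNat from
            ⟨r.toNat, by omega, by omega, by rw [← hgl, ← hgr]; exact heq⟩)
          (hnone l.toNat)
      · simp only [heq, if_neg, not_false_iff]
        by_cases hlt : PySem.List.pyGetD xs l 0 + PySem.List.pyGetD xs r 0 < t
        · simp only [hlt, if_pos]
          exact ih (l + 1) r (by omega) hr (by omega)
        · simp only [hlt, if_neg, not_false_iff]
          exact ih l (r - 1) h0 (by omega) (by omega)
    · simp [h]

lemma loopA_found {xs : List Int} (t : Int) (hs : List.Pairwise (· ≤ ·) xs) (i0 : Nat)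
    (hQ0 : QQ xs t i0) (hmin : ∀ i', i' < i0 → ¬ QQ xs t i') :
    ∀ (fuel : Nat) (l r : Int), 0 ≤ l → r ≤ (xs.length : Int) - 1 →
      (∀ i j : Nat, j < xs.length → i < j → xs.getD i 0 + xs.getD j 0 = t →
        l ≤ (i : Int) ∧ (j : Int) ≤ r) →
      (r - l).toNat ≤ fuel →
      two_sum_ii_best_loop xs t l r
        = [(i0 : Int) + 1, (jst xs (t - xs.getD i0 0) : Int) + 1] := by
  obtain ⟨j1, hj1n, hij1, hsum1⟩ := hQ0
  set c0 := t - xs.getD i0 0 with hc0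
  have hj1c : xs.getD j1 0 = c0 := by omega
  set j0 := jst xs c0 with hj0
  have hj0spec : j0 < xs.length ∧ xs.getD j0 0 = c0 := by
    rw [hj0, jst]
    exact Nat.findGreatest_spec (P := fun j => j < xs.length ∧ xs.getD j 0 = c0)
      (le_of_lt hj1n) ⟨hj1n, hj1c⟩
  have hj1j0 : j1 ≤ j0 := Nat.le_findGreatest (P := fun j => j < xs.length ∧ xs.getD j 0 = c0)
      (le_of_lt hj1n) ⟨hj1n, hj1c⟩
  have hgreatest : ∀ k, j0 < k → k < xs.length → xs.getD k 0 ≠ c0 := by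
    intro k hk hkn hck
    exact absurd (show k < xs.length ∧ xs.getD k 0 = c0 from ⟨hkn, hck⟩)
      (Nat.findGreatest_is_greatest (P := fun j => j < xs.length ∧ xs.getD j 0 = c0) hk (le_of_lt hkn))
  have hsol0 : xs.getD i0 0 + xs.getD j0 0 = t := by
    have := hj0spec.2; omega
  intro fuel
  induction fuel with
  | zero =>
    intro l r h0 hr hinv hf
    obtain ⟨ha, hb⟩ := hinv i0 j1 hj1n hij1 hsum1
    omega
  | succ m ih =>
    intro l r h0 hr hinv hf
    rw [two_sum_ii_best_loop]
    have hlr : l < r := by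
      obtain ⟨ha, hb⟩ := hinv i0 j1 hj1n hij1 hsum1
      omega
    simp only [hlr, dif_pos]
    have hgl : PySem.List.pyGetD xs l 0 = xs.getD l.toNat 0 :=
      PySem.List.pyGetD_of_nonneg xs 0 h0
    have hgr : PySem.List.pyGetD xs r 0 = xs.getD r.toNat 0 :=
      PySem.List.pyGetD_of_nonneg xs 0 (by omega)
    have hrn : r.toNat < xs.length := by omega
    by_cases heq : PySem.List.pyGetD xs l 0 + PySem.List.pyGetD xs r 0 = t
    · simp only [heq, if_pos]
      have hsumlr : xs.getD l.toNat 0 + xs.getD r.toNat 0 = t := by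
        rw [← hgl, ← hgr]; exact heq
      have hQl : QQ xs t l.toNat := ⟨r.toNat, hrn, by omega, hsumlr⟩
      have hl_ge : i0 ≤ l.toNat := by
        by_contra hcon
        exact hmin l.toNat (by omega) hQl
      have hl_le : l ≤ (i0 : Int) := (hinv i0 j1 hj1n hij1 hsum1).1
      have hli : l = (i0 : Int) := by omega
      have hj0r : (j0 : Int) ≤ r := (hinv i0 j0 hj0spec.1 (by omega) hsol0).2
      have hrc : xs.getD r.toNat 0 = c0 := by
        have : l.toNat = i0 := by omega
        rw [this] at hsumlr; omega
      have hrj0 : r.toNat ≤ j0 :=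
        Nat.le_findGreatest (le_of_lt hrn) ⟨hrn, hrc⟩
      have hri : r = (j0 : Int) := by omega
      rw [hli, hri]
    · simp only [heq, if_neg, not_false_iff]
      by_cases hlt : PySem.List.pyGetD xs l 0 + PySem.List.pyGetD xs r 0 < t
      · simp only [hlt, if_pos]
        refine ih (l + 1) r (by omega) hr ?_ (by omega)
        intro i j hjn hij hsum
        obtain ⟨ha, hb⟩ := hinv i j hjn hij hsum
        refine ⟨?_, hb⟩
        by_cases hil : (i : Int) = l
        · exfalso
          have hjr : j ≤ r.toNat := by omega
          have hmono : xs.getD j 0 ≤ xs.getD r.toNat 0 := sorted_getD hs hjr hrn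
          have hieq : i = l.toNat := by omega
          rw [hieq] at hsum
          rw [hgl, hgr] at hlt
          omega
        · omega
      · simp only [hlt, if_neg, not_false_iff]
        refine ih l (r - 1) h0 (by omega) ?_ (by omega)
        intro i j hjn hij hsum
        obtain ⟨ha, hb⟩ := hinv i j hjn hij hsum
        refine ⟨ha, ?_⟩
        by_cases hjr : (j : Int) = r
        · exfalso
          have hin : i < xs.length := by omega
          have hmono : xs.getD l.toNat 0 ≤ xs.getD i 0 := sorted_getD hs (by omega) hin
          have hjeq : j = r.toNat := by omega
          rw [hjeq] at hsum
          rw [hgl, hgr] at hlt heq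
          omega
        · omega

-- ===== VERDICT (by name: the statement is the Claim_ definition above) =====
theorem two_sum_ii_best_spec : Claim_equal_two_sum_ii_best := by
  intro xs t _hdom hpre
  have hs : List.Pairwise (· ≤ ·) xs := hpre
  show two_sum_ii_best xs t = two_sum_ii_best_alt xs t
  rw [two_sum_ii_best, two_sum_ii_best_alt]
  by_cases hex : ∃ i, QQ xs t i
  · obtain ⟨i0, hQ0, hmin'⟩ := wellFounded_lt.has_min {i | QQ xs t i} hex
    have hmin : ∀ i', i' < i0 → ¬ QQ xs t i' := fun i' hlt hQ => hmin' i' hQ hlt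
    have hinv0 : ∀ i j : Nat, j < xs.length → i < j → xs.getD i 0 + xs.getD j 0 = t →
        (0 : Int) ≤ (i : Int) ∧ (j : Int) ≤ (xs.length : Int) - 1 := by
      intro i j hjn _ _; omega
    rw [loopA_found t hs i0 hQ0 hmin ((xs.length : Int) - 1 - 0).toNat 0
        ((xs.length : Int) - 1) (by omega) (by omega) hinv0 (by omega),
      scan_found t hs i0 hQ0 hmin i0 0 (by omega) (by omega)]
  · simp only [not_exists] at hex
    rw [loopA_none t hex ((xs.length : Int) - 1 - 0).toNat 0 ((xs.length : Int) - 1)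
        (by omega) (by omega) (by omega),
      scan_none t hex hs xs.length 0 (by omega)]
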